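-- pv_equiv track=rewrite | github.com/omgxu/STAPpp | data/Q4/gen_dat.py | create_q4_element_data
-- ===== SOURCE A (Python) =====
-- def create_q4_element_data(nx, ny, material_group=1):
--     """创建Q4单元数据"""
--     elements = []
--
--     for j in range(ny):
--         for i in range(nx):
--             node_bl = i + j * (nx + 1) + 1
--             node_br = node_bl + 1
--             node_tr = node_bl + nx + 2
--             node_tl = node_bl + nx + 1
--
--             element_number = i + j * nx + 1
--             elements.append((element_number, node_bl, node_br, node_tr, node_tl, material_group))
--
--     return elements
-- ===== SOURCE B (Python) =====
-- def create_q4_element_data(nx, ny, material_group=1):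
--     """Q4 mesh connectivity: build the bottom row once as a template, then
--     emit each subsequent row as a translated copy of that template."""
--     if nx <= 0 or ny <= 0:
--         return []
--     base = []
--     for i in range(nx):
--         bl = i + 1
--         base.append((i + 1, bl, bl + 1, bl + nx + 2, bl + nx + 1, material_group))
--     elements = []
--     for j in range(ny):
--         de = j * nx            # element-number shift for row j
--         dn = j * (nx + 1)      # node-number shift for row j
--         for (en, a, b, c, d, m) in base:
--             elements.append((en + de, a + dn, b + dn, c + dn, d + dn, m))
--     return elements
-- ===== Notes on version B (the rewrite author's own statement) =====
-- stated objective: alternative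
-- what changed: Instead of recomputing every node index from (i,j) in nested loops, B builds the bottom row of elements once as a template and generates each subsequent row by translating that template (adding a per-row element-number offset j*nx and node-number offset j*(nx+1)); correctness follows from the mesh's row-translation symmetry.
import Mathlib
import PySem

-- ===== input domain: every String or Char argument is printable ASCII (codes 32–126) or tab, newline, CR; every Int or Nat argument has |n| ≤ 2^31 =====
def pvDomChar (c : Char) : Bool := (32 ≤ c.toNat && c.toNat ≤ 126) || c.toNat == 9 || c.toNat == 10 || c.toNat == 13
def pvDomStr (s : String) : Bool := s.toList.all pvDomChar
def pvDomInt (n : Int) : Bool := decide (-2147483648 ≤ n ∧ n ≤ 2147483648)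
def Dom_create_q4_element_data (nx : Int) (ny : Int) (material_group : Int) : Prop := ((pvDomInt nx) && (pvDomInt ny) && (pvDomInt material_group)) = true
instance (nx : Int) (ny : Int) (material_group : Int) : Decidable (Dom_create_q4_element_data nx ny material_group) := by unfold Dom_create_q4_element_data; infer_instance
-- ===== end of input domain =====

-- B builds the bottom row of elements once as a template and emits every other row as a
-- translated copy of it (row-translation symmetry of the mesh); same output, same cost (objective: alternative).

-- ===== PORT A =====
def create_q4_element_data (nx : Int) (ny : Int) (material_group : Int) : List (Int × Int × Int × Int × Int × Int) :=
  (PySem.List.pyRange 0 ny 1).foldl (fun elements j =>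
    (PySem.List.pyRange 0 nx 1).foldl (fun elements i =>
      let node_bl := i + j * (nx + 1) + 1
      let node_br := node_bl + 1
      let node_tr := node_bl + nx + 2
      let node_tl := node_bl + nx + 1
      let element_number := i + j * nx + 1
      elements ++ [(element_number, node_bl, node_br, node_tr, node_tl, material_group)]) elements) []

-- ===== PORT B =====
def create_q4_element_data_alt (nx : Int) (ny : Int) (material_group : Int) : List (Int × Int × Int × Int × Int × Int) :=
  if nx ≤ 0 ∨ ny ≤ 0 then []
  else
  let base := (PySem.List.pyRange 0 nx 1).foldl (fun base i =>
    let bl := i + 1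
    base ++ [(i + 1, bl, bl + 1, bl + nx + 2, bl + nx + 1, material_group)]) []
  (PySem.List.pyRange 0 ny 1).foldl (fun elements j =>
    let de := j * nx
    let dn := j * (nx + 1)
    base.foldl (fun elements t =>
      elements ++ [(t.1 + de, t.2.1 + dn, t.2.2.1 + dn, t.2.2.2.1 + dn, t.2.2.2.2.1 + dn, t.2.2.2.2.2)]) elements) []

-- ===== PRECONDITION & SPEC =====
def Spec_create_q4_element_data (nx : Int) (ny : Int) (material_group : Int) (out : List (Int × Int × Int × Int × Int × Int)) : Prop := out = create_q4_element_data_alt nx ny material_group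
instance (nx : Int) (ny : Int) (material_group : Int) (out : List (Int × Int × Int × Int × Int × Int)) : Decidable (Spec_create_q4_element_data nx ny material_group out) := by unfold Spec_create_q4_element_data; infer_instance

-- ===== CLAIM (what is proved, stated in full; the proofs are below) =====
def Claim_equal_create_q4_element_data : Prop := ∀ (nx : Int) (ny : Int) (material_group : Int), Dom_create_q4_element_data nx ny material_group → Spec_create_q4_element_data nx ny material_group (create_q4_element_data nx ny material_group)

-- ===== LEMMAS AND PROOFS =====

theorem create_q4_element_data_eq (nx ny material_group : Int) :
    create_q4_element_data nx ny material_group = create_q4_element_data_alt nx ny material_group := by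
  unfold create_q4_element_data create_q4_element_data_alt
  by_cases h : nx ≤ 0 ∨ ny ≤ 0
  · rw [if_pos h]
    rcases h with h | h
    · simp [PySem.List.pyRange_one_eq_nil (by omega : nx ≤ 0), List.foldl_fixed]
    · simp [PySem.List.pyRange_one_eq_nil (by omega : ny ≤ 0)]
  · rw [if_neg h]
    simp only [PySem.List.foldl_append_singleton_eq_map]
    rw [PySem.List.foldl_append_eq_flatMap, PySem.List.foldl_append_eq_flatMap]
    simp only [List.nil_append, List.map_map]
    apply List.flatMap_congr
    intro j _
    apply List.map_congr_left
    intro i _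
    simp only [Function.comp_apply, Prod.mk.injEq]
    and_intros <;> first | ring | trivial

-- ===== VERDICT (by name: the statement is the Claim_ definition above) =====
theorem create_q4_element_data_spec : Claim_equal_create_q4_element_data := by
  intro nx ny material_group _
  unfold Spec_create_q4_element_data
  exact create_q4_element_data_eq nx ny material_group
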